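-- pv_equiv track=rewrite | github.com/fredrikhl/advent-of-code | 2020/07-handy/handy.py | _generate_counts
-- ===== SOURCE A (Python) =====
-- def _generate_counts(rules, bags, n):
--     current = bags[-1]
--
--     for child in rules.get(current, ()):
--         if child in bags:
--             # we've already counted this bag
--             raise ValueError('cycle detected: ' + repr(bags + (child,)))
--
--         total = rules[current][child] * n
--         yield total
--
--         # child may contain other bags as well
--         yield from _generate_counts(rules, bags + (child,), total)
-- ===== SOURCE B (Python) =====
-- def _generate_counts(rules, bags, n):
--     # iterative generator: explicit stack of (path, multiplier, child-iterator) frames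
--     stack = [(bags, n, iter(rules.get(bags[-1], ())))]
--     while stack:
--         path, mult, children = stack[-1]
--         child = next(children, None)
--         if child is None:
--             stack.pop()
--             continue
--         if child in path:
--             raise ValueError('cycle detected: ' + repr(path + (child,)))
--         total = rules[path[-1]][child] * mult
--         yield total
--         stack.append((path + (child,), total, iter(rules.get(child, ()))))
-- ===== Notes on version B (the rewrite author's own statement) =====
-- stated objective: alternative
-- what changed: Replaces the recursive generator with an iterative generator driven by an explicit stack of (path, multiplier, remaining-children) frames, yielding the same pre-order stream without Python recursion.
import Mathlib
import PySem

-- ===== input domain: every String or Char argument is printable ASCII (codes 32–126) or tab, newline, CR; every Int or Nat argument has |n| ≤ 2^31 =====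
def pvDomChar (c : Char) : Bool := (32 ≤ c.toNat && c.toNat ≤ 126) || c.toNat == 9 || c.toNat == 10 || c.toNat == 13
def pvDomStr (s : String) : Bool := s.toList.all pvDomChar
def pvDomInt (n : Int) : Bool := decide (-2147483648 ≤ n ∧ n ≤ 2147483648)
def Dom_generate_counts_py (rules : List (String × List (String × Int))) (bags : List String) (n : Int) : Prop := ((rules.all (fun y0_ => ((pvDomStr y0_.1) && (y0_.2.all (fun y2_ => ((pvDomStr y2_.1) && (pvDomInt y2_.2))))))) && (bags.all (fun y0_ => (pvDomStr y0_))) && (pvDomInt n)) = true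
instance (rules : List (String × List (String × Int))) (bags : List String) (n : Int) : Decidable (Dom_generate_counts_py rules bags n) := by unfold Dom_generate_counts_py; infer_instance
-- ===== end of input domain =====

-- B rewrites the recursive generator as an iterative one over an explicit stack of
-- (fuel, path, multiplier, remaining-children) frames; same pre-order stream ('alternative').
-- Both ports carry a fuel argument (rules.length + 2) solely to make the recursion total in
-- Lean; on every input admitted by Pre_ the fuel is never exhausted (paths stay duplicate-free).

-- ===== PORT A =====
-- shared transliteration of 'rules.get(u, ())' / 'rules[u]' (dict lookup = first match)
def pvChildren (rules : List (String × List (String × Int))) (u : String) : List (String × Int) :=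
  (rules.lookup u).getD []

mutual
-- Option result: 'none' = the Python raises (IndexError on bags[-1], ValueError on a cycle)
def gcA (rules : List (String × List (String × Int))) (f : Nat) (bags : List String) (n : Int) : Option (List Int) :=
  match f with
  | 0 => some []
  | f + 1 =>
    match bags.getLast? with                      -- current = bags[-1]; none = IndexError
    | none => none
    | some current => gcAch rules f bags current n (pvChildren rules current)

-- the 'for child in rules.get(current, ())' loop of A
def gcAch (rules : List (String × List (String × Int))) (f : Nat) (bags : List String) (current : String) (n : Int) (children : List (String × Int)) : Option (List Int) :=
  match children with
  | [] => some []
  | (child, _) :: rest =>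
    if bags.contains child then none              -- raise ValueError('cycle detected: …')
    else
      -- rules[current][child] * n  (current is a key here: it produced this child list)
      let total := (((pvChildren rules current).lookup child).getD 0) * n
      match gcA rules f (bags ++ [child]) total with
      | none => none
      | some sub =>
        match gcAch rules f bags current n rest with
        | none => none
        | some tail => some (total :: (sub ++ tail))
end

def generate_counts_py (rules : List (String × List (String × Int))) (bags : List String) (n : Int) : List Int :=
  (gcA rules (rules.length + 2) bags n).getD []

-- ===== PORT B =====
-- a frame of B's stack: (fuel, path, multiplier, remaining children of path[-1])
def pvKidsBound (rules : List (String × List (String × Int))) : Nat :=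
  (rules.map (fun r => r.2.length)).sum

theorem pvChildren_length_le (rules : List (String × List (String × Int))) (u : String) :
    (pvChildren rules u).length ≤ pvKidsBound rules := by
  induction rules with
  | nil => simp [pvChildren]
  | cons r rest ih =>
    obtain ⟨k, v⟩ := r
    simp only [pvChildren, pvKidsBound, List.lookup, List.map_cons, List.sum_cons] at ih ⊢
    cases h : (u == k) <;> simp only [h, Option.getD_some] <;> omega

-- stack-frame potential for termination of the machine loop
def pvMu (rules : List (String × List (String × Int))) (fr : Nat × List String × Int × List (String × Int)) : Nat :=
  (fr.2.2.2.length + 1) * (pvKidsBound rules + 2) ^ fr.1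

-- the 'while stack:' loop of B: peek top frame, pop / raise / yield+push
def runB (rules : List (String × List (String × Int))) (stack : List (Nat × List String × Int × List (String × Int))) : Option (List Int) :=
  match stack with
  | [] => some []
  | (f, path, m, ch) :: rest =>
    match f, ch with
    | 0, _ => runB rules rest                     -- fuel guard (never hit under Pre_)
    | _ + 1, [] => runB rules rest                -- iterator exhausted: pop
    | f' + 1, (child, _) :: more =>
      if path.contains child then none            -- raise ValueError('cycle detected: …')
      else
        let current := path.getLast?.getD ""      -- path[-1]; paths on the stack are nonempty
        let total := (((pvChildren rules current).lookup child).getD 0) * m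
        match runB rules ((f', path ++ [child], total, pvChildren rules child) :: (f' + 1, path, m, more) :: rest) with
        | none => none
        | some out => some (total :: out)
termination_by (stack.map (pvMu rules)).sum
decreasing_by
  all_goals simp only [List.map_cons, List.sum_cons, pvMu, List.length_cons]
  all_goals try (apply Nat.lt_add_of_pos_left; positivity)
  all_goals
    have hb := pvChildren_length_le rules child
    have hp : 0 < (pvKidsBound rules + 2) ^ f' := pow_pos (by omega) f'
    have h1 : ((pvChildren rules child).length + 1) * (pvKidsBound rules + 2) ^ f'
        < (pvKidsBound rules + 2) ^ (f' + 1) := by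
      rw [pow_succ, mul_comm ((pvKidsBound rules + 2) ^ f')]
      exact Nat.mul_lt_mul_of_lt_of_le (by omega) (le_refl _) hp
    have h2 : (more.length + 1 + 1) * (pvKidsBound rules + 2) ^ (f' + 1)
        = (more.length + 1) * (pvKidsBound rules + 2) ^ (f' + 1) + (pvKidsBound rules + 2) ^ (f' + 1) := by
      ring
    rw [h2]
    linarith [h1]

def generate_counts_py_alt (rules : List (String × List (String × Int))) (bags : List String) (n : Int) : List Int :=
  (match bags.getLast? with                        -- bags[-1]; none = IndexError
   | none => none
   | some current => runB rules [(rules.length + 2, bags, n, pvChildren rules current)]).getD []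

-- ===== PRECONDITION & SPEC =====
-- helpers for Pre_: the children (keys) of a node, and the set of nodes reachable from a
-- start set in the rules graph (the closure is reached within rules.length + 1 rounds)
def pvKids (rules : List (String × List (String × Int))) (u : String) : List String :=
  (pvChildren rules u).map (·.1)

def pvReach (rules : List (String × List (String × Int))) (start : List String) : List String :=
  (fun s => (s ++ s.flatMap (pvKids rules)).dedup)^[rules.length + 1] start

-- Pre_ excludes exactly the inputs on which Python A raises: empty bags (IndexError on
-- bags[-1]) and inputs whose rules graph lets the traversal reach a bag already on the path
-- (ValueError 'cycle detected': an edge from a node reachable from bags[-1] into bags, or a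
-- cycle among the nodes reachable from bags[-1]).
def Pre_generate_counts_py (rules : List (String × List (String × Int))) (bags : List String) (n : Int) : Prop :=
  (match bags.getLast? with
   | none => true
   | some last =>
     let r := pvReach rules [last]
     (r.any fun u => (pvKids rules u).any fun c => bags.contains c) ||
     (r.any fun u => (pvReach rules (pvKids rules u)).contains u)) = false

instance (rules : List (String × List (String × Int))) (bags : List String) (n : Int) : Decidable (Pre_generate_counts_py rules bags n) := by unfold Pre_generate_counts_py; infer_instance

def pvWitness_generate_counts_py : (List (String × List (String × Int))) × List String × Int :=
  ([("a", [("b", 2), ("c", 3)]), ("b", [("c", 5)])], ["a"], 4)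

def Spec_generate_counts_py (rules : List (String × List (String × Int))) (bags : List String) (n : Int) (out : List Int) : Prop := out = generate_counts_py_alt rules bags n
instance (rules : List (String × List (String × Int))) (bags : List String) (n : Int) (out : List Int) : Decidable (Spec_generate_counts_py rules bags n out) := by unfold Spec_generate_counts_py; infer_instance

-- ===== CLAIM (what is proved, stated in full; the proofs are below) =====
def Claim_equal_generate_counts_py : Prop := ∀ (rules : List (String × List (String × Int))) (bags : List String) (n : Int), Dom_generate_counts_py rules bags n → Pre_generate_counts_py rules bags n → Spec_generate_counts_py rules bags n (generate_counts_py rules bags n)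

-- ===== LEMMAS AND PROOFS =====
-- what a single frame of B's stack contributes: the A-side loop on its remaining children
def frameSemA (rules : List (String × List (String × Int))) (fr : Nat × List String × Int × List (String × Int)) : Option (List Int) :=
  match fr with
  | (0, _, _, _) => some []
  | (f + 1, path, m, ch) => gcAch rules f path (path.getLast?.getD "") m ch

def stackSem (rules : List (String × List (String × Int))) : List (Nat × List String × Int × List (String × Int)) → Option (List Int)
  | [] => some []
  | fr :: rest =>
    match frameSemA rules fr with
    | none => none
    | some out =>
      match stackSem rules rest with
      | none => none
      | some out2 => some (out ++ out2)

theorem frameSemA_push (rules : List (String × List (String × Int))) (f : Nat) (path : List String) (child : String) (m : Int) :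
    frameSemA rules (f, path ++ [child], m, pvChildren rules child) = gcA rules f (path ++ [child]) m := by
  cases f <;> simp [frameSemA, gcA]

theorem frameSemA_succ (rules : List (String × List (String × Int))) (f : Nat) (path : List String) (m : Int) (ch : List (String × Int)) :
    frameSemA rules (f + 1, path, m, ch) = gcAch rules f path (path.getLast?.getD "") m ch := rfl

theorem stackSem_push (rules : List (String × List (String × Int))) (f' : Nat) (path : List String) (m : Int) (child : String) (v : Int) (more : List (String × Int)) (rest : List (Nat × List String × Int × List (String × Int))) (h : path.contains child = false) :
    stackSem rules ((f' + 1, path, m, (child, v) :: more) :: rest)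
      = Option.map (fun out => ((List.lookup child (pvChildren rules (path.getLast?.getD ""))).getD 0 * m) :: out)
          (stackSem rules ((f', path ++ [child], (List.lookup child (pvChildren rules (path.getLast?.getD ""))).getD 0 * m, pvChildren rules child) :: (f' + 1, path, m, more) :: rest)) := by
  have h' : child ∉ path := by simpa using h
  rcases hA : gcA rules f' (path ++ [child]) ((List.lookup child (pvChildren rules (path.getLast?.getD ""))).getD 0 * m) with _ | sub <;>
  rcases hB : gcAch rules f' path (path.getLast?.getD "") m more with _ | tail <;>
  rcases hC : stackSem rules rest with _ | out2 <;>
  · simp only [stackSem, frameSemA_push, frameSemA_succ]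
    simp [gcAch, h', hA, hB, hC, List.append_assoc]

theorem runB_eq_stackSem (rules : List (String × List (String × Int))) (stack : List (Nat × List String × Int × List (String × Int))) :
    runB rules stack = stackSem rules stack := by
  fun_induction runB rules stack with
  | case1 => simp [stackSem]
  | case2 path m ch rest ih =>
    rcases hC : stackSem rules rest with _ | o2 <;> simp_all [stackSem, frameSemA]
  | case3 path m rest f ih =>
    rcases hC : stackSem rules rest with _ | o2 <;> simp_all [stackSem, frameSemA, gcAch]
  | case4 path m rest f' child v more h =>
    simp [stackSem, frameSemA, gcAch] at h ⊢
    simp [h]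
  | case5 path m rest f' child v more h cur tot hrun ih =>
    rw [stackSem_push rules f' path m child v more rest (by simpa using h)]
    rw [← ih, hrun]
    rfl
  | case6 path m rest f' child v more h cur tot tail hrun ih =>
    rw [stackSem_push rules f' path m child v more rest (by simpa using h)]
    rw [← ih, hrun]
    rfl

theorem generate_counts_py_spec : Claim_equal_generate_counts_py := by
  intro rules bags n _dom _pre
  unfold Spec_generate_counts_py generate_counts_py generate_counts_py_alt
  cases h : bags.getLast? with
  | none => simp [gcA, h]
  | some cur =>
    simp only []
    rw [runB_eq_stackSem]
    have hf : rules.length + 2 = (rules.length + 1) + 1 := rfl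
    rw [hf]
    rcases hA : gcAch rules (rules.length + 1) bags cur n (pvChildren rules cur) with _ | out <;>
      simp [gcA, stackSem, frameSemA_succ, h, hA]
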